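-- pv_equiv track=rewrite | github.com/doovvv/ai_labs_SYSU | lab2/E2_22336290/code/resolution.py | get_new_index
-- ===== SOURCE A (Python) =====
-- def get_new_index(i,j,add_lines):
--     index1 = -1
--     index2 = -1
--     for m in range(0,len(add_lines)):
--         if add_lines[m] == i:
--             index1 = m
--         if add_lines[m] == j:
--             index2 = m;
--     return index1,index2
-- ===== SOURCE B (Python) =====
-- def get_new_index(i, j, add_lines):
--     rev = list(enumerate(add_lines))[::-1]
--
--     def first_from_back(x):
--         for m, v in rev:
--             if v == x:
--                 return m
--         return -1
--
--     return first_from_back(i), first_from_back(j)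
-- ===== Notes on version B (the rewrite author's own statement) =====
-- stated objective: alternative
-- what changed: B runs two independent early-exit searches over the reversed enumerate (last occurrence = first match from the back), instead of A's single forward index loop maintaining and overwriting two scalar accumulators.
import Mathlib
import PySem

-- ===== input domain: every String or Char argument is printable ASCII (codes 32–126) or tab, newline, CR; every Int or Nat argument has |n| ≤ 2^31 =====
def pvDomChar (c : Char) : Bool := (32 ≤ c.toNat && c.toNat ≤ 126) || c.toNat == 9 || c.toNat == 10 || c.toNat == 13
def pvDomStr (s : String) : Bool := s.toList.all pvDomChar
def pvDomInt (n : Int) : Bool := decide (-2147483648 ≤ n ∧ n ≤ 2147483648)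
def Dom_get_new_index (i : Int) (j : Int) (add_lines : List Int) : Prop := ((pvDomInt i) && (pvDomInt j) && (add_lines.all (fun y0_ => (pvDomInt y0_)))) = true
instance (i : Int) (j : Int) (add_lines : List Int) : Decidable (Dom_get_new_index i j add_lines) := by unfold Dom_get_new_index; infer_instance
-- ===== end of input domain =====

-- B replaces A's single forward index loop with two independent early-exit searches over the
-- reversed enumerate (the last occurrence is the first match from the back).

-- ===== PORT A =====
-- for m in range(0, len(add_lines)): if add_lines[m]==i: index1=m; if add_lines[m]==j: index2=m
-- every m generated by the range is a valid index, so pyGetD's default is never used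
def get_new_index (i : Int) (j : Int) (add_lines : List Int) : Int × Int :=
  (PySem.List.pyRange 0 (add_lines.length : Int) 1).foldl
    (fun (st : Int × Int) m =>
      ((if PySem.List.pyGetD add_lines m 0 == i then m else st.1),
       (if PySem.List.pyGetD add_lines m 0 == j then m else st.2)))
    (-1, -1)

-- ===== PORT B =====
-- 'for m, v in rev: if v == x: return m' / 'return -1' — early-exit linear search as structural recursion
def firstFromBack (x : Int) : List (Int × Int) → Int
  | [] => -1
  | p :: ps => if p.2 == x then p.1 else firstFromBack x ps

-- rev = list(enumerate(add_lines))[::-1]; step −1 slice ported with PySem.List.slice?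
def get_new_index_alt (i : Int) (j : Int) (add_lines : List Int) : Int × Int :=
  let rev := (PySem.List.slice? (PySem.List.enumerate add_lines 0) none none (-1)).getD []
  (firstFromBack i rev, firstFromBack j rev)

-- ===== PRECONDITION & SPEC =====
def Spec_get_new_index (i : Int) (j : Int) (add_lines : List Int) (out : Int × Int) : Prop := out = get_new_index_alt i j add_lines
instance (i : Int) (j : Int) (add_lines : List Int) (out : Int × Int) : Decidable (Spec_get_new_index i j add_lines out) := by unfold Spec_get_new_index; infer_instance

-- ===== CLAIM =====
def Claim_equal_get_new_index : Prop := ∀ (i : Int) (j : Int) (add_lines : List Int), Dom_get_new_index i j add_lines → Spec_get_new_index i j add_lines (get_new_index i j add_lines)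

-- ===== LEMMAS AND PROOFS =====

-- first-match-with-default variant of firstFromBack, used only by the proofs
def firstFromBackD (x : Int) (d : Int) : List (Int × Int) → Int
  | [] => d
  | p :: ps => if p.2 == x then p.1 else firstFromBackD x d ps

theorem firstFromBack_eq_D (x : Int) (l : List (Int × Int)) :
    firstFromBack x l = firstFromBackD x (-1) l := by
  induction l with
  | nil => rfl
  | cons p ps ih => simp [firstFromBack, firstFromBackD, ih]

-- search of an appended list: search the front with the back's result as default
theorem firstFromBackD_append (x d : Int) (l₁ l₂ : List (Int × Int)) :
    firstFromBackD x d (l₁ ++ l₂) = firstFromBackD x (firstFromBackD x d l₂) l₁ := by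
  induction l₁ with
  | nil => rfl
  | cons p ps ih => simp [firstFromBackD, ih]

-- a componentwise pair-fold splits into two scalar folds
theorem foldl_pair_split (f g : Int → Int × Int → Int) (l : List (Int × Int)) :
    ∀ (a b : Int),
    l.foldl (fun (st : Int × Int) p => (f st.1 p, g st.2 p)) (a, b)
      = (l.foldl f a, l.foldl g b) := by
  induction l with
  | nil => intro a b; rfl
  | cons p ps ih => intro a b; simp [List.foldl_cons, ih]

-- A's last-overwrite forward scan equals a defaulted first-match over the reversed enumerate
theorem pv_key (x : Int) : ∀ (xs : List Int) (s a : Int),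
    (PySem.List.enumerate xs s).foldl (fun a p => if p.2 == x then p.1 else a) a
      = firstFromBackD x a (PySem.List.enumerate xs s).reverse := by
  intro xs
  induction xs with
  | nil => intro s a; rfl
  | cons y ys ih =>
    intro s a
    rw [PySem.List.enumerate_cons]
    simp only [List.foldl_cons, List.reverse_cons]
    rw [ih, firstFromBackD_append]
    rfl

-- ===== VERDICT =====
theorem get_new_index_spec : Claim_equal_get_new_index := by
  intro i j add_lines _
  unfold Spec_get_new_index get_new_index get_new_index_alt
  rw [PySem.List.slice?_none_none_neg_one]
  simp only [Option.getD_some]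
  have key : (PySem.List.pyRange 0 (add_lines.length : Int) 1).foldl
      (fun (st : Int × Int) m =>
        ((if PySem.List.pyGetD add_lines m 0 == i then m else st.1),
         (if PySem.List.pyGetD add_lines m 0 == j then m else st.2)))
      (-1, -1)
      = (PySem.List.enumerate add_lines 0).foldl
          (fun (st : Int × Int) p =>
            ((if p.2 == i then p.1 else st.1), (if p.2 == j then p.1 else st.2)))
          (-1, -1) := by
    rw [PySem.List.enumerate_eq_map_pyRange add_lines 0, List.foldl_map]
    simp [PySem.List.len]
  rw [key]
  rw [foldl_pair_split (fun a p => if p.2 == i then p.1 else a)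
        (fun a p => if p.2 == j then p.1 else a)]
  rw [pv_key i add_lines 0 (-1), pv_key j add_lines 0 (-1),
      firstFromBack_eq_D, firstFromBack_eq_D]
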